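-- pv_equiv track=rewrite | github.com/masonSmigel/rigamajig2 | scripts/rigamajig2/shared/common.py | fillList
-- ===== SOURCE A (Python) =====
-- def fillList(values, fillName, amount):
--     """
--     add aditional strings to a name using a fill name and in index to match a given amount.
--     :param values: list of values to fill
--     :param fillName: base string used to fill out the list
--     :param amount: number of elements to fit the result list to. 0 based.
--     :return: list of the specificed length
--     """
--     result = list()
--     for i in range(amount):
--         if i <= len(values)-1:
--             result.append(values[i])
--         else:
--             name = fillName + str(i-len(values))
--             result.append(name)
--     return result
-- ===== SOURCE B (Python) =====
-- def fillList(values, fillName, amount):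
--     n = len(values)
--     if amount <= n:
--         return list(values[:max(amount, 0)])
--     return list(values) + [fillName + str(j) for j in range(amount - n)]
-- ===== Notes on version B (the rewrite author's own statement) =====
-- stated objective: simpler
-- what changed: Replaces the element-by-element loop with a per-index kept/filler branch by two unconditional passes: a slice for the kept prefix and a ranged comprehension appending the indexed filler names.
import Mathlib
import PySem

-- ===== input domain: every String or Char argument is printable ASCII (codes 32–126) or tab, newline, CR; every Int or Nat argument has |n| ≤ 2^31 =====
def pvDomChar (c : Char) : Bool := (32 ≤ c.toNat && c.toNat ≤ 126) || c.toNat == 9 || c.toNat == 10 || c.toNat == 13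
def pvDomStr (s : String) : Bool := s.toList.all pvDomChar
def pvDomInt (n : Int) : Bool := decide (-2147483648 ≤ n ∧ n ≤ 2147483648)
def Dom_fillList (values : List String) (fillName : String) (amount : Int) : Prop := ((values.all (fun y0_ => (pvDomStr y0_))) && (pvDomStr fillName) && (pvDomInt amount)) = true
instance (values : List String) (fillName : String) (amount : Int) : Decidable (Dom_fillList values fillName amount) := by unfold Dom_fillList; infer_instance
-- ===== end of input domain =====

-- B replaces A's per-index loop-with-branch by a slice for the kept prefix plus a
-- ranged comprehension for the filler names (objective: simpler).

-- ===== PORT A =====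
def fillList (values : List String) (fillName : String) (amount : Int) : List String :=
  (PySem.List.pyRange 0 amount 1).foldl
    (fun result i =>
      if i ≤ (values.length : Int) - 1 then
        result ++ [PySem.List.pyGetD values i ""]
      else
        result ++ [fillName ++ PySem.Int.toStr (i - values.length)])
    []

-- ===== PORT B =====
def fillList_alt (values : List String) (fillName : String) (amount : Int) : List String :=
  if amount ≤ (values.length : Int) then
    PySem.List.slice values none (some (max amount 0))
  else
    values ++ (PySem.List.pyRange 0 (amount - values.length) 1).map
      (fun j => fillName ++ PySem.Int.toStr j)

-- ===== PRECONDITION & SPEC =====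
def Spec_fillList (values : List String) (fillName : String) (amount : Int) (out : List String) : Prop := out = fillList_alt values fillName amount
instance (values : List String) (fillName : String) (amount : Int) (out : List String) : Decidable (Spec_fillList values fillName amount out) := by unfold Spec_fillList; infer_instance

-- ===== CLAIM (what is proved, stated in full; the proofs are below) =====
def Claim_equal_fillList : Prop := ∀ (values : List String) (fillName : String) (amount : Int), Dom_fillList values fillName amount → Spec_fillList values fillName amount (fillList values fillName amount)

-- ===== LEMMAS AND PROOFS =====

-- common normal form: result for a nonnegative amount m
def fillSpec (values : List String) (fillName : String) (m : Nat) : List String :=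
  if m ≤ values.length then values.take m
  else values ++ (List.range (m - values.length)).map (fun j => fillName ++ PySem.Int.toStr (j : Int))

lemma fillList_eq_spec (values : List String) (fillName : String) (m : Nat) :
    fillList values fillName (m : Int) = fillSpec values fillName m := by
  induction m with
  | zero => simp [fillList, fillSpec, PySem.List.pyRange_one_eq_nil]
  | succ m ih =>
    unfold fillList at ih ⊢
    have hcast : ((m + 1 : Nat) : Int) = (m : Int) + 1 := by push_cast; ring
    rw [hcast, PySem.List.pyRange_one_succ_right (by positivity), List.foldl_concat, ih]
    by_cases hm : m < values.length
    · have h1 : (m : Int) ≤ (values.length : Int) - 1 := by omega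
      have h2 : m + 1 ≤ values.length := by omega
      simp only [fillSpec, if_pos (by omega : m ≤ values.length), if_pos h2, if_pos h1]
      rw [PySem.List.pyGetD_eq_getElem values (i := (m : Int)) "" (by positivity) (by exact_mod_cast hm)]
      simp only [Int.toNat_natCast]
      simpa using List.take_concat_get (l := values) (i := m) (by simpa using hm)
    · have h1 : ¬ ((m : Int) ≤ (values.length : Int) - 1) := by omega
      rw [if_neg h1]
      by_cases he : m = values.length
      · subst he
        simp [fillSpec, List.range_succ]
      · have h3 : ¬ (m ≤ values.length) := by omega
        have h4 : ¬ (m + 1 ≤ values.length) := by omega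
        simp only [fillSpec, if_neg h3, if_neg h4, List.append_assoc]
        have h5 : m + 1 - values.length = (m - values.length) + 1 := by omega
        rw [h5, List.range_succ]
        have h6 : (m : Int) - (values.length : Int) = ((m - values.length : Nat) : Int) := by omega
        simp [h6]

lemma fillList_alt_eq_spec (values : List String) (fillName : String) (m : Nat) :
    fillList_alt values fillName (m : Int) = fillSpec values fillName m := by
  unfold fillList_alt fillSpec
  by_cases h : m ≤ values.length
  · rw [if_pos (by exact_mod_cast h), if_pos h]
    have : max ((m : Nat) : Int) 0 = ((m : Nat) : Int) := by omega
    rw [this, PySem.List.slice_to_natCast]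
  · rw [if_neg (by exact_mod_cast h), if_neg h]
    have h6 : (m : Int) - (values.length : Int) = ((m - values.length : Nat) : Int) := by omega
    rw [h6, PySem.List.pyRange_one]
    simp [← List.map_eq_flatMap]

lemma fillList_neg (values : List String) (fillName : String) (amount : Int) (h : amount ≤ 0) :
    fillList values fillName amount = fillList_alt values fillName amount := by
  have hl : (0 : Int) ≤ (values.length : Int) := by positivity
  unfold fillList fillList_alt
  rw [PySem.List.pyRange_one_eq_nil h, if_pos (by omega)]
  have : max amount 0 = ((0 : Nat) : Int) := by omega
  rw [this, PySem.List.slice_to_natCast]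
  simp

-- ===== VERDICT (by name: the statement is the Claim_ definition above) =====
theorem fillList_spec : Claim_equal_fillList := by
  intro values fillName amount _
  unfold Spec_fillList
  by_cases h : 0 ≤ amount
  · obtain ⟨m, rfl⟩ := Int.eq_ofNat_of_zero_le h
    rw [fillList_eq_spec, fillList_alt_eq_spec]
  · exact fillList_neg values fillName amount (by omega)
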